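-- pv_equiv track=rewrite | github.com/chintan-tundia/Satellite-Image-Labeling-System | ImageLabeling/Gmapv3/views.py | getMaxCoord
-- ===== SOURCE A (Python) =====
-- def getMaxCoord(coordDict):
--     x=0;
--     y=0;
--     maxCoord={};
--     for coord in coordDict:
--         if(x<coord['x']):
--             if(coord['x']>640): #change when img size is variable
--                 x=640;
--             else:
--                 x=coord['x'];
--         if(y<coord['y']):
--             if(coord['y']>640): #change when img size is variable
--                 y=640;
--             else:
--                 y=coord['y'];
--
--     maxCoord["x"]=x;
--     maxCoord["y"]=y;
--     return maxCoord;
-- ===== SOURCE B (Python) =====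
-- def getMaxCoord(coordDict):
--     # Recursive back-to-front decomposition: combine the head coordinate with the
--     # clamped maxima of the tail; the 640 cap is applied at each combine step.
--     def rec(cs):
--         if not cs:
--             return 0, 0
--         rx, ry = rec(cs[1:])
--         c = cs[0]
--         return min(640, max(rx, c["x"])), min(640, max(ry, c["y"]))
--     x, y = rec(coordDict)
--     return {"x": x, "y": y}
-- ===== Notes on version B (the rewrite author's own statement) =====
-- stated objective: alternative
-- what changed: Replaces A's left-to-right interleaved running-max loop with clamp-on-update by a recursion on the list structure that combines each head with the already-clamped maxima of the tail (back-to-front), applying min(640, max(.,.)) at each combine step.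
import Mathlib
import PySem

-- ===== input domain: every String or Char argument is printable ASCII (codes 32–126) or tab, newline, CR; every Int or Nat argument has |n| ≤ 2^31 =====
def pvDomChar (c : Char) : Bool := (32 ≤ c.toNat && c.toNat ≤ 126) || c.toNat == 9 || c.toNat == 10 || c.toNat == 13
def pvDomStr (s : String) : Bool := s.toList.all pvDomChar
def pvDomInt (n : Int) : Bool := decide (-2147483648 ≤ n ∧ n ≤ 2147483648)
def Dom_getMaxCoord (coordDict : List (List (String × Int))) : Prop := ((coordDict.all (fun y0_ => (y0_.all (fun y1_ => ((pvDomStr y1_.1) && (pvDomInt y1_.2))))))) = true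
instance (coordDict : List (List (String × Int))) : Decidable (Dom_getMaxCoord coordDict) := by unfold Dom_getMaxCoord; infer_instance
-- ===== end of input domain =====

-- ===== PORT A =====
-- B replaces A's left-to-right running-max loop by a back-to-front recursion on the list
-- (objective: alternative decomposition, same cost).
-- Loop body of A: running maxima x, y updated with a 640 cap, exactly as the Python branches.
def pvStepA (s : Int × Int) (coord : List (String × Int)) : Int × Int :=
  match (PySem.Dict.mk coord).get? "x", (PySem.Dict.mk coord).get? "y" with
  | some vx, some vy =>
      ((if s.1 < vx then (if vx > 640 then 640 else vx) else s.1),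
       (if s.2 < vy then (if vy > 640 then 640 else vy) else s.2))
  | _, _ => s  -- unreachable under Pre_ (Python raises KeyError there)

def getMaxCoord (coordDict : List (List (String × Int))) : List (String × Int) :=
  let s := coordDict.foldl pvStepA (0, 0)
  (((PySem.Dict.empty : PySem.Dict String Int).insert "x" s.1).insert "y" s.2).items

-- ===== PORT B =====
-- B's inner recursion 'rec': clamped maxima of the tail, combined with the head.
-- (c["x"] / c["y"] would raise KeyError on a missing key, excluded by Pre_; getD totalizes.)
def pvRecB : List (List (String × Int)) → Int × Int
  | [] => (0, 0)
  | c :: rest =>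
      let r := pvRecB rest
      (min 640 (max r.1 ((PySem.Dict.mk c).getD "x" 0)),
       min 640 (max r.2 ((PySem.Dict.mk c).getD "y" 0)))

def getMaxCoord_alt (coordDict : List (List (String × Int))) : List (String × Int) :=
  let p := pvRecB coordDict
  [("x", p.1), ("y", p.2)]

-- ===== PRECONDITION & SPEC =====
-- Pre_ excludes coords missing an "x" or "y" key, on which the Python A raises KeyError.
def Pre_getMaxCoord (coordDict : List (List (String × Int))) : Prop :=
  ∀ c ∈ coordDict, (PySem.Dict.mk c).contains "x" = true ∧ (PySem.Dict.mk c).contains "y" = true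
instance (coordDict : List (List (String × Int))) : Decidable (Pre_getMaxCoord coordDict) := by
  unfold Pre_getMaxCoord; infer_instance
def pvWitness_getMaxCoord : (List (List (String × Int))) := [[("x", 700), ("y", -3)], [("x", 5), ("y", 12)]]

def Spec_getMaxCoord (coordDict : List (List (String × Int))) (out : List (String × Int)) : Prop := out = getMaxCoord_alt coordDict
instance (coordDict : List (List (String × Int))) (out : List (String × Int)) : Decidable (Spec_getMaxCoord coordDict out) := by unfold Spec_getMaxCoord; infer_instance

-- ===== CLAIM (what is proved, stated in full; the proofs are below) =====
def Claim_equal_getMaxCoord : Prop := ∀ (coordDict : List (List (String × Int))), Dom_getMaxCoord coordDict → Pre_getMaxCoord coordDict → Spec_getMaxCoord coordDict (getMaxCoord coordDict)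

-- ===== LEMMAS AND PROOFS =====
-- A's scalar update step equals a clamped max when the state is already ≤ 640.
theorem pvStep_eq_min_max (x v : Int) (h : x ≤ 640) :
    (if x < v then (if v > 640 then 640 else v) else x) = min 640 (max x v) := by
  split_ifs <;> omega

-- Clamping the seed does not change the clamped fold of max.
theorem pvMin640_foldl_max (l : List Int) (a b : Int) (h : min 640 a = min 640 b) :
    min 640 (l.foldl max a) = min 640 (l.foldl max b) := by
  induction l generalizing a b with
  | nil => simpa using h
  | cons c r ih => exact ih _ _ (by omega)

-- A's scalar running-max-with-clamp fold is the clamped plain max fold.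
theorem pvClampFold (l : List Int) (x : Int) (h0 : 0 ≤ x) (h1 : x ≤ 640) :
    l.foldl (fun s v => if s < v then (if v > 640 then 640 else v) else s) x
      = min 640 (l.foldl max x) := by
  induction l generalizing x with
  | nil => simp; omega
  | cons c r ih =>
      simp only [List.foldl_cons]
      rw [pvStep_eq_min_max x c h1, ih (min 640 (max x c)) (by omega) (by omega)]
      exact pvMin640_foldl_max r _ _ (by omega)

-- Under Pre_, A's pair fold splits into the two scalar folds over the looked-up values.
theorem pvFold_split (l : List (List (String × Int)))
    (hpre : ∀ c ∈ l, (PySem.Dict.mk c).contains "x" = true ∧ (PySem.Dict.mk c).contains "y" = true)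
    (x y : Int) :
    l.foldl pvStepA (x, y)
      = ((l.map (fun c => (PySem.Dict.mk c).getD "x" 0)).foldl
            (fun s v => if s < v then (if v > 640 then 640 else v) else s) x,
         (l.map (fun c => (PySem.Dict.mk c).getD "y" 0)).foldl
            (fun s v => if s < v then (if v > 640 then 640 else v) else s) y) := by
  induction l generalizing x y with
  | nil => rfl
  | cons c r ih =>
      obtain ⟨hx, hy⟩ := hpre c (List.mem_cons_self ..)
      rw [PySem.Dict.contains_eq_isSome_get?] at hx hy
      obtain ⟨vx, hvx⟩ := Option.isSome_iff_exists.mp hx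
      obtain ⟨vy, hvy⟩ := Option.isSome_iff_exists.mp hy
      simp only [List.foldl_cons, List.map_cons, pvStepA, hvx, hvy,
        PySem.Dict.getD_eq_get?_getD, Option.getD_some]
      exact ih (fun c hc => hpre c (List.mem_cons_of_mem _ hc)) _ _

-- B's back-to-front recursion computes the clamped right fold of max on each projection.
theorem pvRecB_eq (l : List (List (String × Int))) :
    pvRecB l = (min 640 ((l.map (fun c => (PySem.Dict.mk c).getD "x" 0)).foldr max 0),
                min 640 ((l.map (fun c => (PySem.Dict.mk c).getD "y" 0)).foldr max 0)) := by
  induction l with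
  | nil => simp [pvRecB]
  | cons c r ih =>
      simp only [pvRecB, List.map_cons, List.foldr_cons, ih]
      exact Prod.ext (by dsimp; omega) (by dsimp; omega)

-- A seeded max pulls out of the right fold (max is commutative and associative).
theorem pvFoldr_max_pull (s : List Int) (a c : Int) :
    s.foldr max (max a c) = max c (s.foldr max a) := by
  induction s with
  | nil => exact max_comm a c
  | cons d t ih =>
      simp only [List.foldr_cons, ih]
      rw [max_left_comm]

-- The left and right folds of max agree (max is commutative and associative).
theorem pvFoldl_max_eq_foldr (l : List Int) (a : Int) :
    l.foldl max a = l.foldr max a := by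
  induction l generalizing a with
  | nil => rfl
  | cons c r ih =>
      simp only [List.foldl_cons, List.foldr_cons, ih]
      exact pvFoldr_max_pull r a c

-- ===== VERDICT (by name: the statement is the Claim_ definition above) =====
theorem getMaxCoord_spec : Claim_equal_getMaxCoord := by
  intro coordDict _ hpre
  unfold Spec_getMaxCoord getMaxCoord getMaxCoord_alt
  rw [pvFold_split coordDict hpre 0 0, pvClampFold _ 0 le_rfl (by norm_num),
    pvClampFold _ 0 le_rfl (by norm_num), pvRecB_eq,
    pvFoldl_max_eq_foldr, pvFoldl_max_eq_foldr]
  rfl
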